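-- pv_equiv track=rewrite | github.com/chungty/abm-research | enhanced_engagement_intelligence.py | _generate_conversation_starters
-- ===== SOURCE A (Python) =====
-- from typing import Dict, List, Optional
--
-- def _generate_conversation_starters(pain_points: List[str], role_classification: str) -> List[str]:
--     """Generate role-specific conversation starters"""
--     starters = []
--
--     for pain_point in pain_points[:3]:  # Top 3 pain points
--         if "power capacity" in pain_point.lower():
--             starters.append("What's your current approach to power capacity planning for new deployments?")
--         elif "uptime" in pain_point.lower() or "reliability" in pain_point.lower():
--             starters.append("How do you currently detect and prevent electrical failures before they impact operations?")
--         elif "energy efficiency" in pain_point.lower():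
--             starters.append("What tools do you use for PUE optimization and energy cost reduction?")
--         elif "ai workload" in pain_point.lower():
--             starters.append("How are you handling power monitoring for high-density GPU clusters?")
--         elif "sustainability" in pain_point.lower():
--             starters.append("What's your current process for ESG reporting and carbon metrics collection?")
--
--     # Add role-specific questions
--     if 'Engineer' in role_classification:
--         starters.append("What monitoring tools are you currently using for circuit-level analysis?")
--     elif 'Director' in role_classification or 'Manager' in role_classification:
--         starters.append("How do you build business cases for infrastructure monitoring investments?")
--     elif 'VP' in role_classification or 'CTO' in role_classification or 'CIO' in role_classification:
--         starters.append("What are your key infrastructure KPIs and how do you track them today?")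
--
--     return starters[:5]  # Limit to 5 starters
-- ===== SOURCE B (Python) =====
-- from typing import List, Optional
--
-- # Inverted keyword map: each keyword -> (priority, starter text); the best hit is the
-- # one with the minimal priority, instead of a first-match if/elif chain.
-- _PAIN_KEYWORDS = {
--     "power capacity": (0, "What's your current approach to power capacity planning for new deployments?"),
--     "uptime": (1, "How do you currently detect and prevent electrical failures before they impact operations?"),
--     "reliability": (1, "How do you currently detect and prevent electrical failures before they impact operations?"),
--     "energy efficiency": (2, "What tools do you use for PUE optimization and energy cost reduction?"),
--     "ai workload": (3, "How are you handling power monitoring for high-density GPU clusters?"),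
--     "sustainability": (4, "What's your current process for ESG reporting and carbon metrics collection?"),
-- }
--
-- _ROLE_KEYWORDS = {
--     "Engineer": (0, "What monitoring tools are you currently using for circuit-level analysis?"),
--     "Director": (1, "How do you build business cases for infrastructure monitoring investments?"),
--     "Manager": (1, "How do you build business cases for infrastructure monitoring investments?"),
--     "VP": (2, "What are your key infrastructure KPIs and how do you track them today?"),
--     "CTO": (2, "What are your key infrastructure KPIs and how do you track them today?"),
--     "CIO": (2, "What are your key infrastructure KPIs and how do you track them today?"),
-- }
--
-- def _best(table, hay) -> Optional[str]:
--     hits = [v for k, v in table.items() if k in hay]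
--     if not hits:
--         return None
--     return min(hits, key=lambda t: t[0])[1]
--
-- def _generate_conversation_starters(pain_points: List[str], role_classification: str) -> List[str]:
--     def go(ps, budget):
--         if budget == 0 or not ps:
--             r = _best(_ROLE_KEYWORDS, role_classification)
--             return [] if r is None else [r]
--         rest = go(ps[1:], budget - 1)
--         s = _best(_PAIN_KEYWORDS, ps[0].lower())
--         return rest if s is None else [s] + rest
--
--     # at most 3 pain-point starters plus one role question, so no truncation is needed
--     return go(pain_points, 3)
-- ===== Notes on version B (the rewrite author's own statement) =====
-- stated objective: alternative
-- what changed: Inverts the if/elif chains into keyword->(priority,text) maps where the best hit is the minimum-priority matching keyword, and replaces the imperative accumulator loop by a budgeted recursion that conses pain-point starters onto the role question produced at the base case, dropping the now-unneeded [:5] truncation (at most 4 items are ever produced).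
import Mathlib
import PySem

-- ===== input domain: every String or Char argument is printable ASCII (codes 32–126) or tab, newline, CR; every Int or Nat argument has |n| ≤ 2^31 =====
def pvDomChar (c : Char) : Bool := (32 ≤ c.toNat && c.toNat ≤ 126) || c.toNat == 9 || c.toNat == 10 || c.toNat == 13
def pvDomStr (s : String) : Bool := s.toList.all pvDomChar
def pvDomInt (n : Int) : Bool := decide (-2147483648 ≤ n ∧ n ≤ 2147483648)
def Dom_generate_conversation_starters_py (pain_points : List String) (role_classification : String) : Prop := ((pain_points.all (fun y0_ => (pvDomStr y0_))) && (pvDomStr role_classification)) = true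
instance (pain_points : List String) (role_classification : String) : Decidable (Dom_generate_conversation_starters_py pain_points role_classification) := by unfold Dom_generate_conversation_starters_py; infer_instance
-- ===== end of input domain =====

-- B inverts A's if/elif chains into keyword -> (priority, text) maps resolved by the
-- minimum-priority matching keyword, and replaces the accumulator loop by a budgeted
-- recursion consing onto the role question at the base case (objective: alternative).

-- ===== PORT A =====
def generate_conversation_starters_py (pain_points : List String) (role_classification : String) : List String :=
  let starters : List String :=
    (PySem.List.slice pain_points none (some 3)).foldl (fun starters pain_point =>
      if PySem.Str.isIn "power capacity" (PySem.Str.lower pain_point) then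
        starters ++ ["What's your current approach to power capacity planning for new deployments?"]
      else if PySem.Str.isIn "uptime" (PySem.Str.lower pain_point) || PySem.Str.isIn "reliability" (PySem.Str.lower pain_point) then
        starters ++ ["How do you currently detect and prevent electrical failures before they impact operations?"]
      else if PySem.Str.isIn "energy efficiency" (PySem.Str.lower pain_point) then
        starters ++ ["What tools do you use for PUE optimization and energy cost reduction?"]
      else if PySem.Str.isIn "ai workload" (PySem.Str.lower pain_point) then
        starters ++ ["How are you handling power monitoring for high-density GPU clusters?"]
      else if PySem.Str.isIn "sustainability" (PySem.Str.lower pain_point) then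
        starters ++ ["What's your current process for ESG reporting and carbon metrics collection?"]
      else starters) []
  let starters : List String :=
    if PySem.Str.isIn "Engineer" role_classification then
      starters ++ ["What monitoring tools are you currently using for circuit-level analysis?"]
    else if PySem.Str.isIn "Director" role_classification || PySem.Str.isIn "Manager" role_classification then
      starters ++ ["How do you build business cases for infrastructure monitoring investments?"]
    else if PySem.Str.isIn "VP" role_classification || PySem.Str.isIn "CTO" role_classification || PySem.Str.isIn "CIO" role_classification then
      starters ++ ["What are your key infrastructure KPIs and how do you track them today?"]
    else starters
  PySem.List.slice starters none (some 5)

-- ===== PORT B =====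
def pvPainKeywords : List (String × (Int × String)) :=
  [ ("power capacity", (0, "What's your current approach to power capacity planning for new deployments?"))
  , ("uptime", (1, "How do you currently detect and prevent electrical failures before they impact operations?"))
  , ("reliability", (1, "How do you currently detect and prevent electrical failures before they impact operations?"))
  , ("energy efficiency", (2, "What tools do you use for PUE optimization and energy cost reduction?"))
  , ("ai workload", (3, "How are you handling power monitoring for high-density GPU clusters?"))
  , ("sustainability", (4, "What's your current process for ESG reporting and carbon metrics collection?")) ]

def pvRoleKeywords : List (String × (Int × String)) :=
  [ ("Engineer", (0, "What monitoring tools are you currently using for circuit-level analysis?"))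
  , ("Director", (1, "How do you build business cases for infrastructure monitoring investments?"))
  , ("Manager", (1, "How do you build business cases for infrastructure monitoring investments?"))
  , ("VP", (2, "What are your key infrastructure KPIs and how do you track them today?"))
  , ("CTO", (2, "What are your key infrastructure KPIs and how do you track them today?"))
  , ("CIO", (2, "What are your key infrastructure KPIs and how do you track them today?")) ]

def pvBest (table : List (String × (Int × String))) (hay : String) : Option String :=
  let hits := (table.filter (fun kv => PySem.Str.isIn kv.1 hay)).map (fun kv => kv.2)
  match PySem.List.min? hits (fun t => t.1) with
  | none => none
  | some t => some t.2

def pvGo (role_classification : String) (ps : List String) (budget : Nat) : List String :=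
  match budget, ps with
  | 0, _ | _ + 1, [] =>
    (match pvBest pvRoleKeywords role_classification with
     | none => []
     | some r => [r])
  | b + 1, p :: rest =>
    let tail := pvGo role_classification rest b
    match pvBest pvPainKeywords (PySem.Str.lower p) with
    | none => tail
    | some s => s :: tail

def generate_conversation_starters_py_alt (pain_points : List String) (role_classification : String) : List String :=
  pvGo role_classification pain_points 3

-- ===== PRECONDITION & SPEC =====
def Spec_generate_conversation_starters_py (pain_points : List String) (role_classification : String) (out : List String) : Prop := out = generate_conversation_starters_py_alt pain_points role_classification
instance (pain_points : List String) (role_classification : String) (out : List String) : Decidable (Spec_generate_conversation_starters_py pain_points role_classification out) := by unfold Spec_generate_conversation_starters_py; infer_instance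

-- ===== CLAIM =====
def Claim_equal_generate_conversation_starters_py : Prop := ∀ (pain_points : List String) (role_classification : String), Dom_generate_conversation_starters_py pain_points role_classification → Spec_generate_conversation_starters_py pain_points role_classification (generate_conversation_starters_py pain_points role_classification)

-- ===== LEMMAS AND PROOFS =====

def pvPainList (p : String) : List String :=
  match pvBest pvPainKeywords (PySem.Str.lower p) with
  | none => []
  | some s => [s]

def pvRoleList (r : String) : List String :=
  match pvBest pvRoleKeywords r with
  | none => []
  | some s => [s]

-- A's if/elif pain-point step equals appending B's min-priority classification.
theorem pvPainStep_eq (st : List String) (p : String) :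
    (if PySem.Str.isIn "power capacity" (PySem.Str.lower p) then
        st ++ ["What's your current approach to power capacity planning for new deployments?"]
      else if PySem.Str.isIn "uptime" (PySem.Str.lower p) || PySem.Str.isIn "reliability" (PySem.Str.lower p) then
        st ++ ["How do you currently detect and prevent electrical failures before they impact operations?"]
      else if PySem.Str.isIn "energy efficiency" (PySem.Str.lower p) then
        st ++ ["What tools do you use for PUE optimization and energy cost reduction?"]
      else if PySem.Str.isIn "ai workload" (PySem.Str.lower p) then
        st ++ ["How are you handling power monitoring for high-density GPU clusters?"]
      else if PySem.Str.isIn "sustainability" (PySem.Str.lower p) then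
        st ++ ["What's your current process for ESG reporting and carbon metrics collection?"]
      else st)
    = st ++ pvPainList p := by
  cases h1 : PySem.Str.isIn "power capacity" (PySem.Str.lower p) <;>
  cases h2 : PySem.Str.isIn "uptime" (PySem.Str.lower p) <;>
  cases h3 : PySem.Str.isIn "reliability" (PySem.Str.lower p) <;>
  cases h4 : PySem.Str.isIn "energy efficiency" (PySem.Str.lower p) <;>
  cases h5 : PySem.Str.isIn "ai workload" (PySem.Str.lower p) <;>
  cases h6 : PySem.Str.isIn "sustainability" (PySem.Str.lower p) <;>
    simp only [pvPainList, pvBest, pvPainKeywords, h1, h2, h3, h4, h5, h6,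
      List.filter_cons, List.filter_nil, PySem.List.min?] <;> norm_num

-- A's if/elif role step equals appending B's min-priority role classification.
theorem pvRoleStep_eq (st : List String) (r : String) :
    (if PySem.Str.isIn "Engineer" r then
        st ++ ["What monitoring tools are you currently using for circuit-level analysis?"]
      else if PySem.Str.isIn "Director" r || PySem.Str.isIn "Manager" r then
        st ++ ["How do you build business cases for infrastructure monitoring investments?"]
      else if PySem.Str.isIn "VP" r || PySem.Str.isIn "CTO" r || PySem.Str.isIn "CIO" r then
        st ++ ["What are your key infrastructure KPIs and how do you track them today?"]
      else st)
    = st ++ pvRoleList r := by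
  cases h1 : PySem.Str.isIn "Engineer" r <;>
  cases h2 : PySem.Str.isIn "Director" r <;>
  cases h3 : PySem.Str.isIn "Manager" r <;>
  cases h4 : PySem.Str.isIn "VP" r <;>
  cases h5 : PySem.Str.isIn "CTO" r <;>
  cases h6 : PySem.Str.isIn "CIO" r <;>
    simp only [pvRoleList, pvBest, pvRoleKeywords, h1, h2, h3, h4, h5, h6,
      List.filter_cons, List.filter_nil, PySem.List.min?] <;> norm_num

-- B's budgeted recursion is flatMap over the first `budget` pain points, role at the end.
theorem pvGo_eq (r : String) (ps : List String) (b : Nat) :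
    pvGo r ps b = (ps.take b).flatMap pvPainList ++ pvRoleList r := by
  induction ps generalizing b with
  | nil => cases b <;> simp [pvGo, pvRoleList]
  | cons p rest ih =>
    cases b with
    | zero => simp [pvGo, pvRoleList]
    | succ b =>
      simp only [pvGo, ih b, List.take_succ_cons, List.flatMap_cons, pvPainList]
      cases pvBest pvPainKeywords (PySem.Str.lower p) <;> simp

theorem pvPainList_len (p : String) : (pvPainList p).length ≤ 1 := by
  unfold pvPainList
  cases pvBest pvPainKeywords (PySem.Str.lower p) <;> simp

theorem pvFlatMap_len (l : List String) : (l.flatMap pvPainList).length ≤ l.length := by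
  induction l with
  | nil => simp
  | cons p rest ih =>
    simp only [List.flatMap_cons, List.length_append, List.length_cons]
    have := pvPainList_len p
    omega

theorem pvRoleList_len (r : String) : (pvRoleList r).length ≤ 1 := by
  unfold pvRoleList
  cases pvBest pvRoleKeywords r <;> simp

-- ===== VERDICT =====
theorem generate_conversation_starters_py_spec : Claim_equal_generate_conversation_starters_py := by
  intro pain_points role_classification _
  unfold Spec_generate_conversation_starters_py
  unfold generate_conversation_starters_py generate_conversation_starters_py_alt
  simp only [show (3:Int) = ((3:Nat):Int) by norm_num, show (5:Int) = ((5:Nat):Int) by norm_num,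
    PySem.List.slice_to_natCast]
  have hfold : ∀ (l : List String) (st : List String),
      l.foldl (fun starters pain_point =>
        if PySem.Str.isIn "power capacity" (PySem.Str.lower pain_point) then
          starters ++ ["What's your current approach to power capacity planning for new deployments?"]
        else if PySem.Str.isIn "uptime" (PySem.Str.lower pain_point) || PySem.Str.isIn "reliability" (PySem.Str.lower pain_point) then
          starters ++ ["How do you currently detect and prevent electrical failures before they impact operations?"]
        else if PySem.Str.isIn "energy efficiency" (PySem.Str.lower pain_point) then
          starters ++ ["What tools do you use for PUE optimization and energy cost reduction?"]
        else if PySem.Str.isIn "ai workload" (PySem.Str.lower pain_point) then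
          starters ++ ["How are you handling power monitoring for high-density GPU clusters?"]
        else if PySem.Str.isIn "sustainability" (PySem.Str.lower pain_point) then
          starters ++ ["What's your current process for ESG reporting and carbon metrics collection?"]
        else starters) st = st ++ l.flatMap pvPainList := by
    intro l
    induction l with
    | nil => intro st; simp
    | cons p rest ih =>
      intro st
      simp only [List.foldl_cons, List.flatMap_cons, ih]
      rw [pvPainStep_eq, List.append_assoc]
  rw [hfold, pvRoleStep_eq, pvGo_eq]
  simp only [List.nil_append]
  apply List.take_of_length_le
  have h1 := pvFlatMap_len (pain_points.take 3)
  have h2 := pvRoleList_len role_classification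
  have h3 : (pain_points.take 3).length ≤ 3 := by simp
  simp only [List.length_append]
  omega
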